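-- pv_equiv track=rewrite | github.com/zlightho/algo | 28/task16.py | SherlockValidString
-- ===== SOURCE A (Python) =====
-- def SherlockValidString(s: str) -> bool:
--     """
--     Determines whether a given string is valid based on the following conditions:
--     - All letters occur an equal number of times;
--     - It is allowed to remove one letter to make the frequency of all letters equal.
--
--     Args:
--         s (str): The input string consisting of Latin letters.
--
--     Returns:
--         bool: True if the string is valid, False otherwise.
--
--     Examples:
--         >>> is_valid_password("xyz")
--         True
--         >>> is_valid_password("xyzaa")
--         True
--         >>> is_valid_password("xxyyz")
--         True
--         >>> is_valid_password("xyzzz")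
--         False
--         >>> is_valid_password("xxyyza")
--         False
--         >>> is_valid_password("xxyyzabc")
--         False
--     """
--     letter_freq = {}
--     for letter in s:
--         if letter in letter_freq:
--             letter_freq[letter] += 1
--         else:
--             letter_freq[letter] = 1
--
--     freq_values = list(set(letter_freq.values()))
--
--     if len(freq_values) == 1:
--         return True
--
--     if len(freq_values) != 2:
--         return False
--
--     min_freq, max_freq = sorted(freq_values)
--     freq_diff = max_freq - min_freq
--
--     return (min_freq == 1 and list(letter_freq.values()).count(min_freq) == 1) or (freq_diff == 1 and list(letter_freq.values()).count(max_freq) == 1)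
-- ===== SOURCE B (Python) =====
-- def SherlockValidString(s: str) -> bool:
--     counts = {}
--     for ch in s:
--         counts[ch] = counts.get(ch, 0) + 1
--     c = sorted(counts.values())
--     if not c:
--         return False
--
--     def all_equal(xs):
--         return all(x == xs[0] for x in xs)
--
--     return (all_equal(c)
--             or (c[0] == 1 and all_equal(c[1:]))
--             or (len(c) >= 2 and all_equal(c[:-1]) and c[-1] == c[-2] + 1))
-- ===== Notes on version B (the rewrite author's own statement) =====
-- stated objective: simpler
-- what changed: Replaces A's frequency-of-frequencies analysis (list(set(values)), sort, min/max, two .count scans and a two-clause arithmetic test) by a single sort of the count list followed by three direct scans: all counts equal, or all equal after dropping a leading 1, or all equal with the last count one larger.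
import Mathlib
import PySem

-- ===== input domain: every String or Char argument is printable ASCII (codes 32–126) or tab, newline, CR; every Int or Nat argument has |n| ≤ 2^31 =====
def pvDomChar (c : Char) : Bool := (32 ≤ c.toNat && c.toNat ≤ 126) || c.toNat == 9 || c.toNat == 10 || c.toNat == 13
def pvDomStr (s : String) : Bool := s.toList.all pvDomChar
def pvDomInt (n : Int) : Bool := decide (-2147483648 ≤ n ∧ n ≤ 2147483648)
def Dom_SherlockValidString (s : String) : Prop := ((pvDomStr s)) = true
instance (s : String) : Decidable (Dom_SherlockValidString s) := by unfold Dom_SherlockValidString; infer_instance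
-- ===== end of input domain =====

-- B replaces A's set-of-frequencies / min-max / count arithmetic by a sort-then-scan over the
-- sorted count list (all equal, or drop the first 1, or lower the last by one); objective: simpler.

-- ===== PORT A =====
def SherlockValidString (s : String) : Bool :=
  -- letter_freq built by the if-in-dict loop
  let letterFreq : PySem.Dict Char Int :=
    s.toList.foldl
      (fun d letter =>
        if d.contains letter then d.modify letter 0 (· + 1) else d.insert letter 1)
      PySem.Dict.empty
  -- freq_values = list(set(letter_freq.values()))
  let freqValues : List Int := PySem.Set.ofList letterFreq.values
  if freqValues.length = 1 then true
  else if freqValues.length ≠ 2 then false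
  else
    -- min_freq, max_freq = sorted(freq_values)  (the guard above makes the 2-element match total)
    match PySem.List.sorted freqValues (fun x => x) false with
    | [minFreq, maxFreq] =>
      let freqDiff := maxFreq - minFreq
      (minFreq == 1 && PySem.List.count letterFreq.values minFreq == 1)
        || (freqDiff == 1 && PySem.List.count letterFreq.values maxFreq == 1)
    | _ => false

-- ===== PORT B =====
-- all(x == xs[0] for x in xs)  (True on [], xs[0] is never evaluated then)
def pyAllEqual (xs : List Int) : Bool := xs.all (fun x => x == xs.headI)

def SherlockValidString_alt (s : String) : Bool :=
  let counts : PySem.Dict Char Int :=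
    s.toList.foldl (fun d ch => d.insert ch (d.getD ch 0 + 1)) PySem.Dict.empty
  let c := PySem.List.sorted counts.values (fun x => x) false
  if c.isEmpty then false
  else
    pyAllEqual c
      || (c.headI == 1 && pyAllEqual c.tail)          -- c[0] == 1 and all_equal(c[1:])
      || (decide (2 ≤ c.length) && pyAllEqual c.dropLast
          && (c.getLast! == c.dropLast.getLast! + 1)) -- c[-1] == c[-2] + 1 (len guard first)

-- ===== PRECONDITION & SPEC =====
def Spec_SherlockValidString (s : String) (out : Bool) : Prop := out = SherlockValidString_alt s
instance (s : String) (out : Bool) : Decidable (Spec_SherlockValidString s out) := by unfold Spec_SherlockValidString; infer_instance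

-- ===== CLAIM (what is proved, stated in full; the proofs are below) =====
def Claim_equal_SherlockValidString : Prop := ∀ (s : String), Dom_SherlockValidString s → Spec_SherlockValidString s (SherlockValidString s)

-- ===== LEMMAS AND PROOFS =====

-- The part of A after the counting loop, as a function of the dict's value list.
def ACrit (vals : List Int) : Bool :=
  let freqValues : List Int := PySem.Set.ofList vals
  if freqValues.length = 1 then true
  else if freqValues.length ≠ 2 then false
  else
    match PySem.List.sorted freqValues (fun x => x) false with
    | [minFreq, maxFreq] =>
      let freqDiff := maxFreq - minFreq
      (minFreq == 1 && PySem.List.count vals minFreq == 1)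
        || (freqDiff == 1 && PySem.List.count vals maxFreq == 1)
    | _ => false

-- The part of B after the counting loop, as a function of the dict's value list.
def BCrit (vals : List Int) : Bool :=
  let c := PySem.List.sorted vals (fun x => x) false
  if c.isEmpty then false
  else
    pyAllEqual c
      || (c.headI == 1 && pyAllEqual c.tail)
      || (decide (2 ≤ c.length) && pyAllEqual c.dropLast
          && (c.getLast! == c.dropLast.getLast! + 1))

lemma A_eq_ACrit (s : String) :
    SherlockValidString s = ACrit ((PySem.Dict.counter s.toList).values) := by
  have hstep :
      (fun (d : PySem.Dict Char Int) letter =>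
        if d.contains letter then d.modify letter 0 (· + 1) else d.insert letter 1)
      = fun (d : PySem.Dict Char Int) letter => d.modify letter 0 (· + 1) := by
    funext d letter
    by_cases h : d.contains letter
    · simp [h]
    · have h' : d.contains letter = false := by simpa using h
      simp [h', PySem.Dict.modify, PySem.Dict.getD_of_not_contains d 0 h']
  simp only [SherlockValidString, ACrit, hstep, ← PySem.Dict.counter_eq_foldl]

lemma B_eq_BCrit (s : String) :
    SherlockValidString_alt s = BCrit ((PySem.Dict.counter s.toList).values) := by
  simp only [SherlockValidString_alt, BCrit,
    PySem.Dict.foldl_insert_getD_add_one_eq_counter]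
  rfl

lemma pyAllEqual_iff (xs : List Int) :
    pyAllEqual xs = true ↔ ∀ x ∈ xs, x = xs.headI := by
  simp [pyAllEqual, List.all_eq_true]

lemma pyAllEqual_of_const (xs : List Int) (v : Int) (h : ∀ x ∈ xs, x = v) :
    pyAllEqual xs = true := by
  rw [pyAllEqual_iff]
  intro x hx
  cases xs with
  | nil => simp at hx
  | cons a t =>
    rw [h x hx, List.headI_cons, h a (List.mem_cons_self ..)]

lemma pyAllEqual_eq_false (xs : List Int) (x y : Int)
    (hx : x ∈ xs) (hy : y ∈ xs) (hxy : x ≠ y) : pyAllEqual xs = false := by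
  cases hb : pyAllEqual xs
  · rfl
  · exact absurd (((pyAllEqual_iff xs).mp hb x hx).trans
      (((pyAllEqual_iff xs).mp hb y hy).symm)) hxy

lemma headI_le_of_mem (c : List Int) (hp : c.Pairwise (· ≤ ·)) (x : Int) (hx : x ∈ c) :
    c.headI ≤ x := by
  cases c with
  | nil => simp at hx
  | cons a t =>
    rcases List.mem_cons.mp hx with rfl | h
    · simp
    · exact List.rel_of_pairwise_cons hp h

lemma le_concat_of_mem (e : List Int) (b : Int) (hp : (e ++ [b]).Pairwise (· ≤ ·))
    (x : Int) (hx : x ∈ e) : x ≤ b :=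
  (List.pairwise_append.mp hp).2.2 x hx b (by simp)

lemma getLast!_concat' (d : List Int) (b : Int) : (d ++ [b]).getLast! = b := by
  simp [List.getLast!_eq_getLast?_getD]

theorem crit_eq (vals : List Int) : ACrit vals = BCrit vals := by
  have hmemD : ∀ x : Int,
      x ∈ PySem.List.sorted (PySem.Set.ofList vals) (fun x => x) false ↔ x ∈ vals := by
    intro x
    rw [PySem.List.mem_sorted]
    exact PySem.Set.mem_ofList _ _
  have hDlt := PySem.List.sorted_ofList_pairwise_lt vals
  have hlenD : (PySem.Set.ofList vals : List Int).length
      = (PySem.List.sorted (PySem.Set.ofList vals) (fun x => x) false).length :=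
    (PySem.List.length_sorted _ _ _).symm
  have hcperm : (PySem.List.sorted vals (fun x => x) false).Perm vals :=
    PySem.List.sorted_perm _ _ _
  have hcpair : (PySem.List.sorted vals (fun x => x) false).Pairwise (· ≤ ·) := by
    simpa using PySem.List.sorted_pairwise vals (fun x => x)
  have hmemc : ∀ x : Int, x ∈ PySem.List.sorted vals (fun x => x) false ↔ x ∈ vals := by
    intro x; exact PySem.List.mem_sorted _ _ _ _
  have hcount : ∀ v : Int,
      List.count v (PySem.List.sorted vals (fun x => x) false) = List.count v vals :=
    hcperm.count_eq
  set c := PySem.List.sorted vals (fun x => x) false with hcdef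
  rcases hD : PySem.List.sorted (PySem.Set.ofList vals) (fun x => x) false with
    _ | ⟨m, _ | ⟨M, _ | ⟨z, rest⟩⟩⟩
  · -- no distinct values: vals = []
    have hnil : vals = [] := by
      cases hv : vals with
      | nil => rfl
      | cons v t =>
        exfalso
        have := (hmemD v).mpr (by rw [hv]; exact List.mem_cons_self ..)
        rw [hD] at this
        simp at this
    subst hnil
    decide
  · -- exactly one distinct value m
    rw [hD] at hmemD hlenD
    have hval : ∀ x ∈ vals, x = m := fun x hx => by simpa using (hmemD x).mpr hx
    have hm : m ∈ vals := (hmemD m).mp (by simp)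
    have hlen1 : (PySem.Set.ofList vals : List Int).length = 1 := by simpa using hlenD
    have hmc : m ∈ c := (hmemc m).mpr hm
    have hcne : c ≠ [] := List.ne_nil_of_mem hmc
    have hae : pyAllEqual c = true :=
      pyAllEqual_of_const c m (fun x hx => hval x ((hmemc x).mp hx))
    simp only [ACrit, BCrit, ← hcdef]
    rw [hlen1]
    simp [List.isEmpty_iff, hcne, hae]
  · -- exactly two distinct values m < M
    rw [hD] at hmemD hlenD hDlt
    have hmM : m < M := by simpa using hDlt
    have hvm : ∀ x ∈ vals, x = m ∨ x = M := fun x hx => by simpa using (hmemD x).mpr hx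
    have hm : m ∈ vals := (hmemD m).mp (by simp)
    have hM : M ∈ vals := (hmemD M).mp (by simp)
    have hlen2 : (PySem.Set.ofList vals : List Int).length = 2 := by simpa using hlenD
    have hmc : m ∈ c := (hmemc m).mpr hm
    have hMc : M ∈ c := (hmemc M).mpr hM
    have hcmem : ∀ x ∈ c, x = m ∨ x = M := fun x hx => hvm x ((hmemc x).mp hx)
    have hne : m ≠ M := ne_of_lt hmM
    have hallc : pyAllEqual c = false := pyAllEqual_eq_false c m M hmc hMc hne
    -- head decomposition c = m :: t
    obtain ⟨a, t, hct⟩ : ∃ a t, c = a :: t := by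
      cases hc : c with
      | nil => rw [hc] at hmc; simp at hmc
      | cons a t => exact ⟨a, t, rfl⟩
    have ham : a = m := by
      have h1 : a = m ∨ a = M := hcmem a (hct ▸ List.mem_cons_self ..)
      have h2 : c.headI ≤ m := headI_le_of_mem c hcpair m hmc
      rw [hct, List.headI_cons] at h2
      rcases h1 with rfl | rfl
      · rfl
      · omega
    rw [ham] at hct
    -- tail decomposition c = e ++ [M]
    obtain ⟨e, b, hceb⟩ : ∃ e b, c = e ++ [b] := by
      rcases List.eq_nil_or_concat c with hnil | ⟨e, b, hc⟩
      · rw [hnil] at hmc; simp at hmc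
      · exact ⟨e, b, by rw [hc, List.concat_eq_append]⟩
    have hbM : b = M := by
      have h1 : b = m ∨ b = M := hcmem b (by rw [hceb]; exact List.mem_append_right _ (by simp))
      have h2 : M ≤ b := by
        have := hMc
        rw [hceb] at this hcpair
        rcases List.mem_append.mp this with h | h
        · exact le_concat_of_mem e b hcpair M h
        · simp at h; omega
      rcases h1 with rfl | rfl
      · omega
      · rfl
    rw [hbM] at hceb
    have hme : m ∈ e := by
      have := hmc
      rw [hceb] at this
      rcases List.mem_append.mp this with h | h
      · exact h
      · simp at h; exact absurd h hne
    have hlenc : (2 : Nat) ≤ c.length := by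
      have h1 : 0 < e.length := List.length_pos_of_mem hme
      rw [hceb, List.length_append]
      simp; omega
    have hdrop : c.dropLast = e := by rw [hceb]; simp
    have hlast : c.getLast! = M := by rw [hceb]; exact getLast!_concat' e M
    have hhead : c.headI = m := by rw [hct]; rfl
    have htail : c.tail = t := by rw [hct]; rfl
    have hempty : c.isEmpty = false := by rw [hct]; rfl
    -- clause 2 core
    have hcountm : List.count m vals = List.count m t + 1 := by
      rw [← hcount m, hct]; simp
    have hA1 : pyAllEqual t = (List.count m vals == 1) := by
      by_cases h0 : List.count m t = 0
      · have hterms : ∀ x ∈ t, x = M := by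
          intro x hx
          rcases hcmem x (hct ▸ List.mem_cons_of_mem _ hx) with rfl | rfl
          · exact absurd hx (List.count_eq_zero.mp h0)
          · rfl
        rw [pyAllEqual_of_const t M hterms]
        have h1 : List.count m vals = 1 := by omega
        simp [h1]
      · have hmt : m ∈ t := by rw [← List.count_pos_iff]; omega
        have hMt : M ∈ t := by
          have := hMc
          rw [hct] at this
          rcases List.mem_cons.mp this with h | h
          · exact absurd h.symm hne
          · exact h
        rw [pyAllEqual_eq_false t m M hmt hMt hne]
        have h1 : List.count m vals ≠ 1 := by omega
        have h2 : (List.count m vals == 1) = false := by simpa using h1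
        rw [h2]
    -- clause 3 core
    have hcountM : List.count M vals = List.count M e + 1 := by
      rw [← hcount M, hceb]; simp [List.count_append]
    have hA2 : (pyAllEqual e && (M == e.getLast! + 1))
        = ((M - m == 1) && (List.count M vals == 1)) := by
      by_cases h0 : List.count M e = 0
      · have hterms : ∀ x ∈ e, x = m := by
          intro x hx
          rcases hcmem x (by rw [hceb]; exact List.mem_append_left _ hx) with rfl | rfl
          · rfl
          · exact absurd hx (List.count_eq_zero.mp h0)
        rw [pyAllEqual_of_const e m hterms]
        obtain ⟨e', b', he'⟩ : ∃ e' b', e = e' ++ [b'] := by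
          rcases List.eq_nil_or_concat e with hnil | ⟨e', b', he⟩
          · exact absurd hnil (List.ne_nil_of_mem hme)
          · exact ⟨e', b', by rw [he, List.concat_eq_append]⟩
        have hb'm : b' = m := hterms b' (by rw [he']; exact List.mem_append_right _ (by simp))
        have hlaste : e.getLast! = m := by rw [he', getLast!_concat', hb'm]
        have h1 : List.count M vals = 1 := by omega
        rw [hlaste]
        have hcnt : (List.count M vals == 1) = true := by simp [h1]
        have hMm : (M == m + 1) = (M - m == 1) := by
          by_cases hq : M = m + 1
          · simp [hq]
          · simp [hq, show M - m ≠ 1 by omega]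
        rw [hcnt, hMm]
        simp [Bool.and_comm]
      · have hMe : M ∈ e := by rw [← List.count_pos_iff]; omega
        rw [pyAllEqual_eq_false e m M hme hMe hne]
        have h1 : List.count M vals ≠ 1 := by omega
        have h2 : (List.count M vals == 1) = false := by simpa using h1
        rw [h2]
        simp
    -- assemble
    simp only [ACrit, BCrit, ← hcdef]
    rw [hlen2, hD]
    simp only [PySem.List.count_eq]
    rw [hempty, hhead, htail, hdrop, hlast]
    have hg : decide ((2 : Nat) ≤ c.length) = true := by simpa using hlenc
    rw [hg]
    simp only [Bool.false_eq_true, if_false, Bool.true_and, ne_eq,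
      not_true_eq_false, hallc, hA1, Bool.false_or]
    rw [hA2]
    norm_num
  · -- three or more distinct values
    rw [hD] at hmemD hlenD hDlt
    have hp1 := List.pairwise_cons.mp hDlt
    have hp2 := List.pairwise_cons.mp hp1.2
    have hmM : m < M := hp1.1 M (by simp)
    have hmz : m < z := hp1.1 z (by simp)
    have hMz : M < z := hp2.1 z (by simp)
    have hMv : M ∈ vals := (hmemD M).mp (by simp)
    have hzv : z ∈ vals := (hmemD z).mp (by simp)
    have hmv : m ∈ vals := (hmemD m).mp (by simp)
    have hlen3 : (PySem.Set.ofList vals : List Int).length = rest.length + 3 := by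
      simpa using hlenD
    have hmc : m ∈ c := (hmemc m).mpr hmv
    have hMc : M ∈ c := (hmemc M).mpr hMv
    have hzc : z ∈ c := (hmemc z).mpr hzv
    have hallc : pyAllEqual c = false := pyAllEqual_eq_false c M z hMc hzc (ne_of_lt hMz)
    obtain ⟨a, t, hct⟩ : ∃ a t, c = a :: t := by
      cases hc : c with
      | nil => rw [hc] at hmc; simp at hmc
      | cons a t => exact ⟨a, t, rfl⟩
    have ham : a ≤ m := by
      have h2 : c.headI ≤ m := headI_le_of_mem c hcpair m hmc
      rwa [hct, List.headI_cons] at h2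
    have hMt : M ∈ t := by
      have := hMc; rw [hct] at this
      rcases List.mem_cons.mp this with h | h
      · omega
      · exact h
    have hzt : z ∈ t := by
      have := hzc; rw [hct] at this
      rcases List.mem_cons.mp this with h | h
      · omega
      · exact h
    have hallt : pyAllEqual t = false := pyAllEqual_eq_false t M z hMt hzt (ne_of_lt hMz)
    obtain ⟨e, b, hceb⟩ : ∃ e b, c = e ++ [b] := by
      rcases List.eq_nil_or_concat c with hnil | ⟨e, b, hc⟩
      · rw [hnil] at hmc; simp at hmc
      · exact ⟨e, b, by rw [hc, List.concat_eq_append]⟩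
    have hzb : z ≤ b := by
      have := hzc
      rw [hceb] at this hcpair
      rcases List.mem_append.mp this with h | h
      · exact le_concat_of_mem e b hcpair z h
      · simp at h; omega
    have hme : m ∈ e := by
      have := hmc; rw [hceb] at this
      rcases List.mem_append.mp this with h | h
      · exact h
      · simp at h; omega
    have hMe : M ∈ e := by
      have := hMc; rw [hceb] at this
      rcases List.mem_append.mp this with h | h
      · exact h
      · simp at h; omega
    have halle : pyAllEqual e = false := pyAllEqual_eq_false e m M hme hMe (ne_of_lt hmM)
    have hdrop : c.dropLast = e := by rw [hceb]; simp
    have htail : c.tail = t := by rw [hct]; rfl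
    have hempty : c.isEmpty = false := by rw [hct]; rfl
    simp only [ACrit, BCrit, ← hcdef]
    rw [hlen3]
    rw [hempty, htail, hdrop]
    simp [hallc, hallt, halle]

-- ===== VERDICT (by name: the statement is the Claim_ definition above) =====
theorem SherlockValidString_spec : Claim_equal_SherlockValidString := by
  intro s _
  unfold Spec_SherlockValidString
  rw [A_eq_ACrit, B_eq_BCrit, crit_eq]
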